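-- pv_equiv track=rewrite | github.com/AgnieszkaFalenska/GeBNLP2021 | scripts/wiki/filter_gender_words.py | splitByPunctuation
-- ===== SOURCE A (Python) =====
-- import string
--
-- def splitByPunctuation(word):
--     result = ""
--     for c in word:
--         if c in string.punctuation + "“‚‘":
--             result += " " + c + " "
--         else:
--             result += c
--
--     return [ w for w in result.split() if len(w) > 0 ]
-- ===== SOURCE B (Python) =====
-- import string
--
-- _PUNCTS = set(string.punctuation + "“‚‘")
--
-- def splitByPunctuation(word):
--     # single pass tokenizer: no padded intermediate string, no split()
--     tokens = []
--     i, n = 0, len(word)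
--     while i < n:
--         c = word[i]
--         if c in _PUNCTS:
--             tokens.append(c)
--             i += 1
--         elif c.isspace():
--             i += 1
--         else:
--             j = i + 1
--             while j < n and word[j] not in _PUNCTS and not word[j].isspace():
--                 j += 1
--             tokens.append(word[i:j])
--             i = j
--     return tokens
-- ===== Notes on version B (the rewrite author's own statement) =====
-- stated objective: alternative
-- what changed: Instead of building a space-padded intermediate string and then running str.split(), B tokenizes the input in a single pass, emitting each punctuation character and each maximal run of non-punctuation non-whitespace characters directly.
import Mathlib
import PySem

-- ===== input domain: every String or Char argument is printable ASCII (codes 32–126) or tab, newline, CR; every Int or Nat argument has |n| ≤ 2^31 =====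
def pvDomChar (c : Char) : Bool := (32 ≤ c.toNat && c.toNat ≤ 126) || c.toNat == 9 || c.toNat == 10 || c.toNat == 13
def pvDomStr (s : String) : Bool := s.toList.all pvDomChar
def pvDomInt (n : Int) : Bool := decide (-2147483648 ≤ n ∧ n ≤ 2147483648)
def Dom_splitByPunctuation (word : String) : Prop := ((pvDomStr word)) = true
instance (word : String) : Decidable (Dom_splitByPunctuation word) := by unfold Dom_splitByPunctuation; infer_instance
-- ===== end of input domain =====

-- B replaces A's padded-string-then-split() construction by a single-pass tokenizer
-- that emits punctuation chars and maximal non-punctuation/non-space runs directly (objective: alternative).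


-- string.punctuation + "“‚‘" (the same constant both Pythons build);
-- 'c in <that string>' is substring search, which for a single char is exactly membership
def pvPuncts : List Char := "!\"#$%&'()*+,-./:;<=>?@[\\]^_`{|}~“‚‘".toList
def pvIsPunct (c : Char) : Bool := pvPuncts.contains c

-- ===== PORT A =====
def splitByPunctuation (word : String) : List String :=
  let result : List Char :=
    word.toList.foldl
      (fun acc c => if pvIsPunct c then acc ++ [' ', c, ' '] else acc ++ [c]) []
  ((PySem.Chars.split₀ result).filter (fun w => decide (0 < w.length))).map String.ofList

-- ===== PORT B =====
def pvOk (c : Char) : Bool := !(pvIsPunct c) && !(PySem.Chars.isspace c)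

def pvTokens : List Char → List String
  | [] => []
  | c :: rest =>
    if pvIsPunct c then String.ofList [c] :: pvTokens rest
    else if PySem.Chars.isspace c then pvTokens rest
    else String.ofList (c :: rest.takeWhile pvOk) :: pvTokens (rest.dropWhile pvOk)
termination_by cs => cs.length
decreasing_by
  · simp
  · simp
  · have := List.length_dropWhile_le pvOk rest; simp; omega

def splitByPunctuation_alt (word : String) : List String := pvTokens word.toList

-- ===== PRECONDITION & SPEC =====
def Spec_splitByPunctuation (word : String) (out : List String) : Prop := out = splitByPunctuation_alt word
instance (word : String) (out : List String) : Decidable (Spec_splitByPunctuation word out) := by unfold Spec_splitByPunctuation; infer_instance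

-- ===== CLAIM (what is proved, stated in full; the proofs are below) =====
def Claim_equal_splitByPunctuation : Prop := ∀ (word : String), Dom_splitByPunctuation word → Spec_splitByPunctuation word (splitByPunctuation word)

-- ===== LEMMAS AND PROOFS =====

-- per-char expansion done by A's loop
def pvExpand (c : Char) : List Char := if pvIsPunct c then [' ', c, ' '] else [c]

def pvNotWs (c : Char) : Bool := !PySem.Chars.isspace c

-- whitespace-splitting expressed as maximal-run recursion
def pvSplitR : List Char → List (List Char)
  | [] => []
  | c :: rest =>
    if PySem.Chars.isspace c then pvSplitR rest
    else (c :: rest.takeWhile pvNotWs) :: pvSplitR (rest.dropWhile pvNotWs)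
termination_by cs => cs.length
decreasing_by
  · simp
  · have := List.length_dropWhile_le pvNotWs rest; simp; omega

-- List-level version of pvTokens
def pvTokensC : List Char → List (List Char)
  | [] => []
  | c :: rest =>
    if pvIsPunct c then [c] :: pvTokensC rest
    else if PySem.Chars.isspace c then pvTokensC rest
    else (c :: rest.takeWhile pvOk) :: pvTokensC (rest.dropWhile pvOk)
termination_by cs => cs.length
decreasing_by
  · simp
  · simp
  · have := List.length_dropWhile_le pvOk rest; simp; omega

lemma pv_space_ws : PySem.Chars.isspace ' ' = true := by decide

lemma pv_punct_not_ws {c : Char} (h : pvIsPunct c = true) :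
    PySem.Chars.isspace c = false := by
  have hall : pvPuncts.all (fun c => !PySem.Chars.isspace c) = true := by decide
  have hm : c ∈ pvPuncts := by simpa [pvIsPunct] using h
  simpa using List.all_eq_true.mp hall c hm

lemma pv_foldl_expand (cs : List Char) (acc : List Char) :
    cs.foldl (fun acc c => if pvIsPunct c then acc ++ [' ', c, ' '] else acc ++ [c]) acc
      = acc ++ cs.flatMap pvExpand := by
  induction cs generalizing acc with
  | nil => simp
  | cons c rest ih =>
    by_cases h : pvIsPunct c = true <;>
      simp [List.foldl_cons, ih, pvExpand, h, List.append_assoc]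

lemma pv_go_spec (s : List Char) :
    ∀ acc, (PySem.Chars.split₀.go s [] acc = acc.reverse ++ pvSplitR s) ∧
      ∀ cur, cur ≠ [] →
        PySem.Chars.split₀.go s cur acc =
          acc.reverse ++ (cur.reverse ++ s.takeWhile pvNotWs) ::
            pvSplitR (s.dropWhile pvNotWs) := by
  induction s with
  | nil =>
    intro acc
    constructor
    · simp [PySem.Chars.split₀.go, pvSplitR]
    · intro cur hcur
      simp [PySem.Chars.split₀.go, pvSplitR, List.isEmpty_iff, hcur]
  | cons c rest ih =>
    intro acc
    by_cases hws : PySem.Chars.isspace c = true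
    · constructor
      · rw [pvSplitR]
        simp [PySem.Chars.split₀.go, hws, (ih acc).1]
      · intro cur hcur
        have h1 := (ih (cur.reverse :: acc)).1
        have hd : List.dropWhile pvNotWs (c :: rest) = c :: rest := by
          simp [List.dropWhile_cons, pvNotWs, hws]
        have ht : List.takeWhile pvNotWs (c :: rest) = [] := by
          simp [List.takeWhile_cons, pvNotWs, hws]
        rw [ht, hd, pvSplitR]
        simp [PySem.Chars.split₀.go, hws, List.isEmpty_iff, hcur, h1]
    · constructor
      · have h2 := ((ih acc).2 [c] (by simp))
        rw [pvSplitR]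
        simp [PySem.Chars.split₀.go, hws, h2]
      · intro cur hcur
        have h2 := ((ih acc).2 (c :: cur) (by simp))
        simp [PySem.Chars.split₀.go, hws, h2, List.takeWhile_cons, List.dropWhile_cons,
          pvNotWs, List.append_assoc]

lemma pv_split₀_eq (s : List Char) : PySem.Chars.split₀ s = pvSplitR s := by
  have := (pv_go_spec s []).1
  simpa [PySem.Chars.split₀] using this

lemma pv_splitR_ne_nil (s : List Char) : ∀ w ∈ pvSplitR s, w ≠ [] := by
  induction s using pvSplitR.induct with
  | case1 => simp [pvSplitR]
  | case2 c rest hws ih => rw [pvSplitR]; simpa [hws] using ih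
  | case3 c rest hws ih =>
    rw [pvSplitR]
    simp only [hws, Bool.false_eq_true, if_false]
    intro w hw
    rw [List.mem_cons] at hw
    rcases hw with rfl | hw
    · simp
    · exact ih w hw

lemma pv_takeWhile_flatMap (rest : List Char) :
    (rest.flatMap pvExpand).takeWhile pvNotWs = rest.takeWhile pvOk := by
  induction rest with
  | nil => simp
  | cons d rest ih =>
    rw [List.flatMap_cons, pvExpand]
    by_cases hp : pvIsPunct d = true
    · simp [hp, List.takeWhile_cons, pvNotWs, pv_space_ws, pvOk]
    · by_cases hws : PySem.Chars.isspace d = true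
      · simp [hp, List.takeWhile_cons, pvNotWs, hws, pvOk]
      · simp [hp, List.takeWhile_cons, pvNotWs, hws, pvOk, ih]

lemma pv_dropWhile_flatMap (rest : List Char) :
    (rest.flatMap pvExpand).dropWhile pvNotWs = (rest.dropWhile pvOk).flatMap pvExpand := by
  induction rest with
  | nil => simp
  | cons d rest ih =>
    rw [List.flatMap_cons, pvExpand]
    by_cases hp : pvIsPunct d = true
    · simp [hp, List.dropWhile_cons, pvNotWs, pv_space_ws, pvOk, List.flatMap_cons,
        pvExpand]
    · by_cases hws : PySem.Chars.isspace d = true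
      · simp [hp, List.dropWhile_cons, pvNotWs, hws, pvOk, List.flatMap_cons, pvExpand]
      · simp [hp, List.dropWhile_cons, pvNotWs, hws, pvOk, ih]

lemma pv_splitR_flatMap (cs : List Char) :
    pvSplitR (cs.flatMap pvExpand) = pvTokensC cs := by
  induction cs using pvTokensC.induct with
  | case1 => simp [pvSplitR, pvTokensC]
  | case2 c rest hp ih =>
    have hws := pv_punct_not_ws hp
    rw [pvTokensC]
    rw [List.flatMap_cons, pvExpand]
    simp only [hp, if_true]
    show pvSplitR (' ' :: c :: ' ' :: rest.flatMap pvExpand) = _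
    rw [pvSplitR]
    simp only [pv_space_ws, if_true]
    rw [pvSplitR]
    simp only [hws, Bool.false_eq_true, if_false, List.takeWhile_cons, List.dropWhile_cons,
      pvNotWs, pv_space_ws, Bool.not_true]
    rw [pvSplitR]
    simp [pv_space_ws, ih]
  | case3 c rest hp hws ih =>
    rw [pvTokensC, List.flatMap_cons, pvExpand]
    simp only [hp, Bool.false_eq_true, if_false, hws, if_true, List.singleton_append]
    rw [pvSplitR]
    simp [hws, ih]
  | case4 c rest hp hws ih =>
    rw [pvTokensC, List.flatMap_cons, pvExpand]
    simp only [hp, Bool.false_eq_true, if_false, hws, List.singleton_append]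
    rw [pvSplitR]
    simp [hws, pv_takeWhile_flatMap, pv_dropWhile_flatMap, ih]

lemma pv_tokens_eq_map (cs : List Char) :
    pvTokens cs = (pvTokensC cs).map String.ofList := by
  induction cs using pvTokensC.induct with
  | case1 => rw [pvTokens, pvTokensC]; simp
  | case2 c rest hp ih => rw [pvTokens, pvTokensC]; simp [hp, ih]
  | case3 c rest hp hws ih => rw [pvTokens, pvTokensC]; simp [hp, hws, ih]
  | case4 c rest hp hws ih => rw [pvTokens, pvTokensC]; simp [hp, hws, ih]

-- ===== VERDICT (by name: the statement is the Claim_ definition above) =====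
theorem splitByPunctuation_spec : Claim_equal_splitByPunctuation := by
  intro word _
  show splitByPunctuation word = splitByPunctuation_alt word
  simp only [splitByPunctuation, splitByPunctuation_alt]
  rw [pv_foldl_expand, List.nil_append, pv_split₀_eq, pv_splitR_flatMap,
    List.filter_eq_self.mpr, pv_tokens_eq_map]
  intro w hw
  have hne : w ≠ [] := by
    have := pv_splitR_flatMap word.toList
    exact pv_splitR_ne_nil (word.toList.flatMap pvExpand) w (by rw [this]; exact hw)
  simp [List.length_pos_iff, hne]
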